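-- pv_equiv track=rewrite | github.com/adityakotha03/tritonLLM | src/LLMs/base_client.py | _parse_ideas
-- ===== SOURCE A (Python) =====
-- from typing import List
--
-- def _parse_ideas(response: str, num_ideas: int) -> List[str]:
--     """
--     Parse optimization ideas from LLM response.
--     Expects ideas to be numbered or separated by blank lines.
--
--     Args:
--         response: Raw LLM response
--         num_ideas: Expected number of ideas
--
--     Returns:
--         List of parsed ideas
--     """
--     ideas = []
--     lines = response.strip().split('\n')
--
--     current_idea = []
--     for line in lines:
--         line = line.strip()
--
--         # Check if this is a new idea (numbered like "1.", "2.", etc.)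
--         if line and (
--             line[0].isdigit() and '.' in line[:5] or
--             line.startswith('Idea') or
--             line.startswith('**Idea')
--         ):
--             # Save previous idea if exists
--             if current_idea:
--                 idea_text = ' '.join(current_idea).strip()
--                 if idea_text:
--                     ideas.append(idea_text)
--                 current_idea = []
--
--             # Start new idea (remove numbering)
--             if line[0].isdigit():
--                 # Remove "1. " or "1) " prefix
--                 line = line.split('.', 1)[-1].strip()
--                 line = line.split(')', 1)[-1].strip()
--
--             current_idea.append(line)
--         elif line:
--             # Continue current idea
--             current_idea.append(line)
--         elif current_idea:
--             # Blank line might separate ideas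
--             idea_text = ' '.join(current_idea).strip()
--             if idea_text:
--                 ideas.append(idea_text)
--             current_idea = []
--
--     # Don't forget the last idea
--     if current_idea:
--         idea_text = ' '.join(current_idea).strip()
--         if idea_text:
--             ideas.append(idea_text)
--
--     # Return up to num_ideas
--     return ideas[:num_ideas] if ideas else [response]
-- ===== SOURCE B (Python) =====
-- def _is_header(line):
--     # header test for a (known nonblank) stripped line
--     return (line[0].isdigit() and '.' in line[:5]) or line.startswith('Idea') or line.startswith('**Idea')
--
--
-- def _parse_ideas(response, num_ideas):
--     # Segment scanner: strip all lines up front, then walk with two pointers,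
--     # cutting each idea out as one contiguous run [i, j) in a single shot
--     # (a header or the first nonblank line starts a run; the run extends over
--     # following nonblank non-header lines). No accumulator, no flush sites.
--     lines = [l.strip() for l in response.strip().split('\n')]
--     n = len(lines)
--     ideas = []
--     i = 0
--     while i < n:
--         head = lines[i]
--         if not head:
--             i += 1
--             continue
--         if _is_header(head) and head[0].isdigit():
--             head = head.split('.', 1)[-1].strip()
--             head = head.split(')', 1)[-1].strip()
--         j = i + 1
--         while j < n and lines[j] and not _is_header(lines[j]):
--             j += 1
--         text = ' '.join([head] + lines[i + 1:j]).strip()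
--         if text:
--             ideas.append(text)
--         i = j
--     return ideas[:num_ideas] if ideas else [response]
-- ===== Notes on version B (the rewrite author's own statement) =====
-- stated objective: alternative
-- what changed: B replaces A's per-line state machine (current_idea accumulator flushed at three sites: header, blank line, end of input) with a two-pointer segment scanner over the pre-stripped line list: each idea is cut out as one contiguous run [i,j) found by an inner scan and rendered in a single join, with no accumulator or flush logic.
import Mathlib
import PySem

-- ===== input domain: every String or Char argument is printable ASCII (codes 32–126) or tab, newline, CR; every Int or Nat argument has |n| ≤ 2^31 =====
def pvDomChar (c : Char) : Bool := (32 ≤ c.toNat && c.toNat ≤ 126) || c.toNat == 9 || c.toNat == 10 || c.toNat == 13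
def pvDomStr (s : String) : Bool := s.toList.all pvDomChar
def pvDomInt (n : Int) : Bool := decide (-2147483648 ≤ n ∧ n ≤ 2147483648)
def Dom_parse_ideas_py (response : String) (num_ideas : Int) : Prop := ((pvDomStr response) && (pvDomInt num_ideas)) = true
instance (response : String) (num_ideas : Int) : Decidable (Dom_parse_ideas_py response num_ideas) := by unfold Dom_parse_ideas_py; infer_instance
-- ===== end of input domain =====

-- B replaces A's flush-on-boundary state machine by a two-pointer segment scanner that cuts
-- each idea out as one contiguous run of the pre-stripped line list (objective: alternative, same cost).

-- shared helpers (the identical sub-expressions of both Pythons)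
-- line[0].isdigit()  (line[0] exists whenever the test is reached; none → false is unreachable there)
def pvDigitFirst (line : String) : Bool :=
  match PySem.Str.pyGet? line 0 with
  | some c => PySem.Chars.isdigit c
  | none => false

-- (line[0].isdigit() and '.' in line[:5]) or line.startswith('Idea') or line.startswith('**Idea')
def pvIsHeader (line : String) : Bool :=
  (pvDigitFirst line && PySem.Str.isIn "." (PySem.Str.slice line none (some 5)))
    || PySem.Str.startswith line "Idea" || PySem.Str.startswith line "**Idea"

-- line = line.split('.', 1)[-1].strip(); line = line.split(')', 1)[-1].strip()
def pvStripNum (line : String) : String :=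
  let l1 := PySem.Str.strip (List.getLastD ((PySem.Str.splitMax? line "." 1).getD []) "")
  PySem.Str.strip (List.getLastD ((PySem.Str.splitMax? l1 ")" 1).getD []) "")

-- ' '.join(b).strip()
def pvRender (b : List String) : String := PySem.Str.strip (PySem.Str.join " " b)

-- ===== PORT A =====
-- one loop iteration of A over state (ideas, current_idea)
def pvStepA (st : List String × List String) (raw : String) : List String × List String :=
  let line := PySem.Str.strip raw
  if line ≠ "" && pvIsHeader line then
    let ideas :=
      if st.2 ≠ [] then
        (if pvRender st.2 ≠ "" then st.1 ++ [pvRender st.2] else st.1)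
      else st.1
    let line := if pvDigitFirst line then pvStripNum line else line
    (ideas, [line])
  else if line ≠ "" then
    (st.1, st.2 ++ [line])
  else if st.2 ≠ [] then
    ((if pvRender st.2 ≠ "" then st.1 ++ [pvRender st.2] else st.1), [])
  else st

def parse_ideas_py (response : String) (num_ideas : Int) : List String :=
  let lines := (PySem.Str.split? (PySem.Str.strip response) "\n").getD []
  let st := lines.foldl pvStepA ([], [])
  let ideas := if st.2 ≠ [] then (if pvRender st.2 ≠ "" then st.1 ++ [pvRender st.2] else st.1) else st.1
  if ideas ≠ [] then PySem.List.slice ideas none (some num_ideas) else [response]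

-- ===== PORT B =====
-- the inner-scan condition:  lines[j] and not _is_header(lines[j])
def pvCont (x : String) : Bool := x ≠ "" && !pvIsHeader x

-- the outer while loop over segment starts: each recursive call is 'i = j';
-- the inner while loop advancing j is takeWhile/dropWhile with pvCont
def pvScan : List String → List String
  | [] => []
  | head :: rest =>
    if head = "" then pvScan rest          -- skip a blank line (i += 1)
    else
      let head' := if pvIsHeader head && pvDigitFirst head then pvStripNum head else head
      let text := pvRender (head' :: rest.takeWhile pvCont)
      (if text ≠ "" then [text] else []) ++ pvScan (rest.dropWhile pvCont)
termination_by l => l.length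
decreasing_by
  · simp
  · simpa using Nat.lt_succ_of_le (List.length_dropWhile_le pvCont rest)

def parse_ideas_py_alt (response : String) (num_ideas : Int) : List String :=
  let lines := ((PySem.Str.split? (PySem.Str.strip response) "\n").getD []).map PySem.Str.strip
  let ideas := pvScan lines
  if ideas ≠ [] then PySem.List.slice ideas none (some num_ideas) else [response]

-- ===== PRECONDITION & SPEC =====
def Spec_parse_ideas_py (response : String) (num_ideas : Int) (out : List String) : Prop := out = parse_ideas_py_alt response num_ideas
instance (response : String) (num_ideas : Int) (out : List String) : Decidable (Spec_parse_ideas_py response num_ideas out) := by unfold Spec_parse_ideas_py; infer_instance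

-- ===== CLAIM (what is proved, stated in full; the proofs are below) =====
def Claim_equal_parse_ideas_py : Prop := ∀ (response : String) (num_ideas : Int), Dom_parse_ideas_py response num_ideas → Spec_parse_ideas_py response num_ideas (parse_ideas_py response num_ideas)

-- ===== LEMMAS AND PROOFS =====

-- "append the rendered block if its text is nonempty"
def pvEmit (b : List String) : List String := if pvRender b ≠ "" then [pvRender b] else []

lemma pvRender_nil : pvRender [] = "" := by rfl

-- A's flush (guarded by current ≠ []) is unconditionally pvEmit
lemma flushA_eq (ideas : List String) (cur : List String) :
    (if cur ≠ [] then (if pvRender cur ≠ "" then ideas ++ [pvRender cur] else ideas) else ideas)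
      = ideas ++ pvEmit cur := by
  rcases cur with _ | ⟨x, xs⟩
  · simp [pvEmit, pvRender_nil]
  · simp only [ne_eq, reduceCtorEq, not_false_eq_true, if_true, pvEmit]
    by_cases h : pvRender (x :: xs) = "" <;> simp [h]

lemma pvScan_blank (rest : List String) : pvScan ("" :: rest) = pvScan rest := by
  rw [pvScan]; simp

lemma pvScan_cons (head : String) (rest : List String) (h : head ≠ "") :
    pvScan (head :: rest)
      = pvEmit ((if pvIsHeader head && pvDigitFirst head then pvStripNum head else head)
                  :: rest.takeWhile pvCont)
          ++ pvScan (rest.dropWhile pvCont) := by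
  rw [pvScan]; simp [h, pvEmit]

-- main loop invariant: A's flushed state = segments already closed + the open run
lemma loop_inv (raws : List String) (ideas cur : List String) :
    (let st := raws.foldl pvStepA (ideas, cur)
     if st.2 ≠ [] then (if pvRender st.2 ≠ "" then st.1 ++ [pvRender st.2] else st.1) else st.1)
      = ideas ++ (if cur = [] then pvScan (raws.map PySem.Str.strip)
                  else pvEmit (cur ++ (raws.map PySem.Str.strip).takeWhile pvCont)
                        ++ pvScan ((raws.map PySem.Str.strip).dropWhile pvCont)) := by
  induction raws generalizing ideas cur with
  | nil =>
    simp only [List.foldl_nil, flushA_eq, List.map_nil, List.takeWhile_nil, List.dropWhile_nil,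
      pvScan, List.append_nil]
    by_cases h : cur = [] <;> simp [h, pvEmit, pvRender_nil]
  | cons raw rest ih =>
    simp only [List.foldl_cons, List.map_cons]
    set line := PySem.Str.strip raw with hline
    by_cases h0 : line = ""
    · have hA : pvStepA (ideas, cur) raw = (ideas ++ pvEmit cur, []) := by
        simp only [pvStepA, ← hline, h0, ne_eq, not_true_eq_false, decide_false, Bool.false_and,
          Bool.false_eq_true, if_neg, not_false_eq_true, flushA_eq]
        rcases cur with _ | ⟨x, xs⟩
        · simp [pvEmit, pvRender_nil]
        · by_cases hr : pvRender (x :: xs) = "" <;> simp [pvEmit, hr]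
      rw [hA, ih]
      have hcont : pvCont line = false := by simp [pvCont, h0]
      by_cases hc : cur = []
      · simp [hc, h0, pvScan_blank, pvEmit, pvRender_nil]
      · simp [hc, h0, pvCont, pvScan_blank]
    · by_cases hh : pvIsHeader line = true
      · set line' := if pvDigitFirst line then pvStripNum line else line with hl'
        have hA : pvStepA (ideas, cur) raw = (ideas ++ pvEmit cur, [line']) := by
          simp only [pvStepA, ← hline, h0, hh, ne_eq, not_false_eq_true, decide_true,
            Bool.and_self, if_pos, flushA_eq, hl']
        rw [hA, ih]
        have hcont : pvCont line = false := by simp [pvCont, hh]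
        have hscan : pvScan (line :: rest.map PySem.Str.strip)
            = pvEmit (line' :: (rest.map PySem.Str.strip).takeWhile pvCont)
                ++ pvScan ((rest.map PySem.Str.strip).dropWhile pvCont) := by
          rw [pvScan_cons line _ h0, hl']; simp [hh]
        by_cases hc : cur = []
        · simp [hc, hscan, pvEmit, pvRender_nil]
        · simp [hc, hcont, hscan]
      · have hA : pvStepA (ideas, cur) raw = (ideas, cur ++ [line]) := by
          simp [pvStepA, ← hline, h0, hh]
        rw [hA, ih]
        have hcont : pvCont line = true := by simp [pvCont, h0, hh]
        have hscan : pvScan (line :: rest.map PySem.Str.strip)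
            = pvEmit (line :: (rest.map PySem.Str.strip).takeWhile pvCont)
                ++ pvScan ((rest.map PySem.Str.strip).dropWhile pvCont) := by
          rw [pvScan_cons line _ h0]; simp [hh]
        by_cases hc : cur = []
        · simp [hc, hscan]
        · simp [hc, hcont]
  -- NB: `simp` closes each branch by list associativity after the rewrites

-- A's loop result, flushed, is exactly B's segment scan of the stripped lines
lemma finish_eq (L : List String) :
    (if (L.foldl pvStepA ([], [])).2 ≠ [] then
       (if pvRender (L.foldl pvStepA ([], [])).2 ≠ "" then
          (L.foldl pvStepA ([], [])).1 ++ [pvRender (L.foldl pvStepA ([], [])).2]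
        else (L.foldl pvStepA ([], [])).1)
     else (L.foldl pvStepA ([], [])).1) = pvScan (L.map PySem.Str.strip) := by
  have h := loop_inv L [] []
  simpa using h

-- ===== VERDICT (by name: the statement is the Claim_ definition above) =====
theorem parse_ideas_py_spec : Claim_equal_parse_ideas_py := by
  intro response num_ideas _
  simp only [Spec_parse_ideas_py, parse_ideas_py, parse_ideas_py_alt]
  rw [finish_eq]
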